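-- pv_equiv track=rewrite | github.com/roytian1992/NarrativeKnowledgeWeaver | core/functions/regular_functions/external_entity_candidates.py | _dedup_open_entities
-- ===== SOURCE A (Python) =====
-- from typing import Any, Dict, List, Sequence, Tuple
--
-- def _dedup_open_entities(items: Sequence[Dict[str, str]]) -> List[Dict[str, str]]:
--     merged: Dict[str, Dict[str, str]] = {}
--     for item in items or []:
--         if not isinstance(item, dict):
--             continue
--         name = str(item.get("name", "")).strip()
--         desc = str(item.get("description", "")).strip()
--         if not name:
--             continue
--         key = name.lower()
--         cur = merged.get(key)
--         if cur is None or len(desc) > len(str(cur.get("description", ""))):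
--             merged[key] = {"name": name, "description": desc}
--     return list(merged.values())
-- ===== SOURCE B (Python) =====
-- from typing import Any, Dict, List, Sequence, Tuple
--
-- def _dedup_open_entities(items: Sequence[Dict[str, str]]) -> List[Dict[str, str]]:
--     # Group cleaned records by lowercased name, then pick the longest-description
--     # record of each group (max keeps the first maximal, like A's strict update).
--     groups: Dict[str, List[Dict[str, str]]] = {}
--     for item in items or []:
--         if not isinstance(item, dict):
--             continue
--         name = str(item.get("name", "")).strip()
--         desc = str(item.get("description", "")).strip()
--         if not name:
--             continue
--         groups.setdefault(name.lower(), []).append({"name": name, "description": desc})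
--     return [max(grp, key=lambda r: len(r["description"])) for grp in groups.values()]
-- ===== Notes on version B (the rewrite author's own statement) =====
-- stated objective: alternative
-- what changed: Replaces A's inline conditional-update of a best-so-far dict with a two-phase group-then-reduce: first pass groups cleaned records by lowercased name, second pass selects each group's first longest-description record with max(key=len).
import Mathlib
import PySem

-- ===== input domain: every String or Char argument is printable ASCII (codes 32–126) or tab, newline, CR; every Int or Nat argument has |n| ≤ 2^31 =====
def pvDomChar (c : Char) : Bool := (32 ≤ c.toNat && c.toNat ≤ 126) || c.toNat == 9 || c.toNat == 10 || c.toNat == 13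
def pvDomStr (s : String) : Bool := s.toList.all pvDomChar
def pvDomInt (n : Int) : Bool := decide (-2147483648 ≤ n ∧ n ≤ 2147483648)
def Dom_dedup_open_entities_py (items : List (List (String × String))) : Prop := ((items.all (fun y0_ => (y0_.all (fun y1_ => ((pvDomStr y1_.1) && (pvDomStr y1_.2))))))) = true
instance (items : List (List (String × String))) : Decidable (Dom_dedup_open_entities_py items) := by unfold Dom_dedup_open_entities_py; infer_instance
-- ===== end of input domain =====

-- B regroups the same cleaned records by lowercased name and reduces each group with
-- Python's max(key=len(description)); equivalence of the two decompositions is proved below.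

-- ===== PORT A =====
-- body of A's for-loop (one conditional update of the best-so-far record per key)
def pvStepA (m : PySem.Dict String (List (String × String))) (item : List (String × String)) :
    PySem.Dict String (List (String × String)) :=
  let name := PySem.Str.strip ((PySem.Dict.mk item).getD "name" "")
  let desc := PySem.Str.strip ((PySem.Dict.mk item).getD "description" "")
  if name = "" then m
  else
    let key := PySem.Str.lower name
    match m.get? key with
    | none => m.insert key [("name", name), ("description", desc)]
    | some cur =>
      if PySem.Str.len desc > PySem.Str.len ((PySem.Dict.mk cur).getD "description" "") then
        m.insert key [("name", name), ("description", desc)]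
      else m

def dedup_open_entities_py (items : List (List (String × String))) : List (List (String × String)) :=
  (items.foldl pvStepA PySem.Dict.empty).values

-- ===== PORT B =====
-- len(r["description"]); every record B builds carries that key, so getD with "" is exact here
def pvDescLen (r : List (String × String)) : Int :=
  PySem.Str.len ((PySem.Dict.mk r).getD "description" "")

-- body of B's grouping loop: groups.setdefault(key, []).append(record)
def pvStepB (g : PySem.Dict String (List (List (String × String)))) (item : List (String × String)) :
    PySem.Dict String (List (List (String × String))) :=
  let name := PySem.Str.strip ((PySem.Dict.mk item).getD "name" "")
  let desc := PySem.Str.strip ((PySem.Dict.mk item).getD "description" "")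
  if name = "" then g
  else g.modify (PySem.Str.lower name) [] (· ++ [[("name", name), ("description", desc)]])

def dedup_open_entities_py_alt (items : List (List (String × String))) : List (List (String × String)) :=
  let groups := items.foldl pvStepB PySem.Dict.empty
  groups.values.map (fun grp => PySem.List.maxD grp pvDescLen [])

-- ===== PRECONDITION & SPEC =====
def Spec_dedup_open_entities_py (items : List (List (String × String))) (out : List (List (String × String))) : Prop := out = dedup_open_entities_py_alt items
instance (items : List (List (String × String))) (out : List (List (String × String))) : Decidable (Spec_dedup_open_entities_py items out) := by unfold Spec_dedup_open_entities_py; infer_instance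

-- ===== CLAIM (what is proved, stated in full; the proofs are below) =====
def Claim_equal_dedup_open_entities_py : Prop := ∀ (items : List (List (String × String))), Dom_dedup_open_entities_py items → Spec_dedup_open_entities_py items (dedup_open_entities_py items)

-- ===== LEMMAS AND PROOFS =====

def pvPick (g : List (List (String × String))) : List (String × String) :=
  PySem.List.maxD g pvDescLen []

theorem pvPick_singleton (r : List (String × String)) : pvPick [r] = r := by
  simp [pvPick, PySem.List.maxD, PySem.List.max?]

def pvPhi (p : String × List (List (String × String))) : String × List (String × String) :=
  (p.1, pvPick p.2)

theorem pv_rec_descLen (n d : String) :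
    pvDescLen [("name", n), ("description", d)] = PySem.Str.len d := by
  simp [pvDescLen, PySem.Dict.getD, PySem.Dict.get?, List.find?]

theorem pvPick_append (g : List (List (String × String))) (r : List (String × String)) (h : g ≠ []) :
    pvPick (g ++ [r]) = if pvDescLen (pvPick g) < pvDescLen r then r else pvPick g := by
  obtain ⟨m, hm⟩ : ∃ m, PySem.List.max? g pvDescLen = some m := by
    cases hh : PySem.List.max? g pvDescLen with
    | none => exact absurd ((PySem.List.max?_eq_none_iff _ _).1 hh) h
    | some m => exact ⟨m, rfl⟩
  have h2 : PySem.List.max? (g ++ [r]) pvDescLen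
      = if pvDescLen m < pvDescLen r then some r else some m := by
    unfold PySem.List.max? at hm ⊢
    rw [List.foldl_append, hm]
    simp [List.foldl]
  simp only [pvPick, PySem.List.maxD, h2, hm]
  split <;> simp <;> intro hx <;> omega

theorem pv_get?_mk_map (l : List (String × List (List (String × String)))) (k : String) :
    (PySem.Dict.mk (l.map pvPhi)).get? k = ((PySem.Dict.mk l).get? k).map pvPick := by
  simp [PySem.Dict.get?, List.find?_map, Function.comp_def, pvPhi, Option.map_map]

theorem pv_contains_mk_map (l : List (String × List (List (String × String)))) (k : String) :
    (PySem.Dict.mk (l.map pvPhi)).contains k = (PySem.Dict.mk l).contains k := by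
  simp [PySem.Dict.contains, List.any_map, Function.comp_def, pvPhi]


def pvInv (m : PySem.Dict String (List (List (String × String)))) : Prop :=
  m.keys.Nodup ∧ ∀ p ∈ m.items, p.2 ≠ []

theorem pvInv_step (m : PySem.Dict String (List (List (String × String)))) (item : List (String × String))
    (h : pvInv m) : pvInv (pvStepB m item) := by
  obtain ⟨hnd, hne⟩ := h
  simp only [pvStepB, PySem.Dict.modify]
  split
  · exact ⟨hnd, hne⟩
  · refine ⟨PySem.Dict.nodup_keys_insert _ _ _ hnd, ?_⟩
    intro p hp
    rcases (PySem.Dict.mem_items_insert _ _ _ _).1 hp with h1 | ⟨h1, _⟩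
    · subst h1; simp
    · exact hne p h1

theorem pvStep_comm (m : PySem.Dict String (List (List (String × String)))) (item : List (String × String))
    (h : pvInv m) :
    pvStepA (PySem.Dict.mk (m.items.map pvPhi)) item = PySem.Dict.mk ((pvStepB m item).items.map pvPhi) := by
  obtain ⟨hnd, hne⟩ := h
  simp only [pvStepA, pvStepB, PySem.Dict.modify]
  by_cases hn : PySem.Str.strip ((PySem.Dict.mk item).getD "name" "") = ""
  · simp [hn]
  · simp only [hn, if_false]
    set name := PySem.Str.strip ((PySem.Dict.mk item).getD "name" "") with hname
    set desc := PySem.Str.strip ((PySem.Dict.mk item).getD "description" "") with hdesc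
    set k := PySem.Str.lower name with hk
    set rc : List (String × String) := [("name", name), ("description", desc)] with hrc
    cases hg : m.get? k with
    | none =>
      have hc : m.contains k = false := by rw [PySem.Dict.contains_eq_isSome_get?, hg]; rfl
      have hcA : (PySem.Dict.mk (m.items.map pvPhi)).contains k = false := by
        rw [pv_contains_mk_map]; exact hc
      have hgA : (PySem.Dict.mk (m.items.map pvPhi)).get? k = none := by
        rw [pv_get?_mk_map]; rw [show (PySem.Dict.mk m.items) = m from rfl, hg]; rfl
      rw [hgA]
      rw [PySem.Dict.getD_of_get?_eq_none _ _ hg]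
      show (PySem.Dict.mk (List.map pvPhi m.items)).insert k rc
          = PySem.Dict.mk (List.map pvPhi (m.insert k ([] ++ [rc])).items)
      apply PySem.Dict.ext
      rw [PySem.Dict.items_insert_of_not_contains _ _ hcA,
          PySem.Dict.items_insert_of_not_contains _ _ hc]
      simp [pvPhi, pvPick_singleton]
    | some g =>
      have hc : m.contains k = true := by rw [PySem.Dict.contains_eq_isSome_get?, hg]; rfl
      have hcA : (PySem.Dict.mk (m.items.map pvPhi)).contains k = true := by
        rw [pv_contains_mk_map]; exact hc
      have hgA : (PySem.Dict.mk (m.items.map pvPhi)).get? k = some (pvPick g) := by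
        rw [pv_get?_mk_map]; rw [show (PySem.Dict.mk m.items) = m from rfl, hg]; rfl
      have hgd : m.getD k [] = g := PySem.Dict.getD_of_get?_eq_some _ _ hg
      have hgne : g ≠ [] := hne (k, g) (PySem.Dict.mem_items_of_get?_eq_some _ hg)
      have hrcv : pvDescLen rc = PySem.Str.len desc := pv_rec_descLen name desc
      simp only [hgA, hgd]
      by_cases hlt : pvDescLen (pvPick g) < pvDescLen rc
      · rw [if_pos (by rw [← hrcv]; exact hlt)]
        apply PySem.Dict.ext
        rw [PySem.Dict.items_insert_of_contains _ _ hcA,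
            PySem.Dict.items_insert_of_contains _ _ hc]
        simp only [List.map_map]
        apply List.map_congr_left
        intro p hp
        by_cases hpk : p.1 = k
        · simp [Function.comp, pvPhi, hpk, pvPick_append g rc hgne, hlt]
        · simp [Function.comp, pvPhi, hpk]
      · rw [if_neg (by rw [← hrcv]; exact hlt)]
        apply PySem.Dict.ext
        rw [PySem.Dict.items_insert_of_contains _ _ hc]
        show List.map pvPhi m.items = _
        simp only [List.map_map]
        apply List.map_congr_left
        intro p hp
        by_cases hpk : p.1 = k
        · have hp2 : p.2 = g := by
            have := PySem.Dict.get?_of_mem_items m (k := p.1) (v := p.2) hp hnd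
            rw [hpk, hg] at this; exact (Option.some.inj this).symm
          have hpe : p = (k, g) := by
            cases p; simp at hpk hp2; simp [hpk, hp2]
          simp [Function.comp, pvPhi, hpe, pvPick_append g rc hgne, hlt]
        · simp [Function.comp, pvPhi, hpk]

theorem pvLoop (items : List (List (String × String))) (m : PySem.Dict String (List (List (String × String))))
    (h : pvInv m) :
    items.foldl pvStepA (PySem.Dict.mk (m.items.map pvPhi)) =
      PySem.Dict.mk ((items.foldl pvStepB m).items.map pvPhi) := by
  induction items generalizing m with
  | nil => rfl
  | cons x xs ih =>
      simp only [List.foldl_cons]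
      rw [pvStep_comm m x h]
      exact ih _ (pvInv_step m x h)

-- ===== VERDICT (by name: the statement is the Claim_ definition above) =====
theorem dedup_open_entities_py_spec : Claim_equal_dedup_open_entities_py := by
  intro items _
  unfold Spec_dedup_open_entities_py
  have h0 : pvInv PySem.Dict.empty := by
    constructor
    · simp [PySem.Dict.keys, PySem.Dict.empty]
    · intro p hp; simp [PySem.Dict.empty] at hp
  have h := pvLoop items PySem.Dict.empty h0
  unfold dedup_open_entities_py dedup_open_entities_py_alt
  have he : (PySem.Dict.mk ((PySem.Dict.empty : PySem.Dict String (List (List (String × String)))).items.map pvPhi)) = (PySem.Dict.empty : PySem.Dict String (List (String × String))) := rfl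
  rw [he] at h
  rw [h]
  simp [PySem.Dict.values, pvPhi, pvPick, Function.comp]
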